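-- pv_equiv track=rewrite | github.com/sunshinefactoryyy/app-security-proj | app/utils.py | calcDataP8
-- ===== SOURCE A (Python) =====
-- def calcDataP8(past8log):
--     weeks = []
--     for week in past8log:
--         debugCount, infoCount, warningCount, errorCount, criticalCount = 0, 0, 0, 0, 0
--         for log in week:
--             if log['level'].lower() == 'debug':
--                debugCount += 1
--             elif log['level'].lower() == 'info':
--                 infoCount += 1
--             elif log['level'].lower() == 'warning':
--                 warningCount += 1
--             elif log['level'].lower() == 'error':
--                 errorCount += 1
--             elif log['level'].lower() == 'critical':
--                 criticalCount += 1
--         week = [debugCount, infoCount, warningCount, errorCount, criticalCount]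
--         weeks.append(week)
--     levels = []
--     for i in range(5):
--         tmp = []
--         for week in weeks:
--             tmp.append(week[i])
--         levels.append(tmp)
--     return levels
-- ===== SOURCE B (Python) =====
-- def calcDataP8(past8log):
--     # Level-major traversal: one comprehension per level counts its occurrences in each week;
--     # no per-week counter tuple, no intermediate matrix, no transpose pass.
--     return [[sum(1 for log in week if log['level'].lower() == name) for week in past8log]
--             for name in ('debug', 'info', 'warning', 'error', 'critical')]
-- ===== Notes on version B (the rewrite author's own statement) =====
-- stated objective: simpler
-- what changed: B traverses level-major: for each of the five level names it scans all weeks counting that level (five passes, nested comprehension), instead of A's week-major single pass building five counters per week and then transposing the matrix.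
import Mathlib
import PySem

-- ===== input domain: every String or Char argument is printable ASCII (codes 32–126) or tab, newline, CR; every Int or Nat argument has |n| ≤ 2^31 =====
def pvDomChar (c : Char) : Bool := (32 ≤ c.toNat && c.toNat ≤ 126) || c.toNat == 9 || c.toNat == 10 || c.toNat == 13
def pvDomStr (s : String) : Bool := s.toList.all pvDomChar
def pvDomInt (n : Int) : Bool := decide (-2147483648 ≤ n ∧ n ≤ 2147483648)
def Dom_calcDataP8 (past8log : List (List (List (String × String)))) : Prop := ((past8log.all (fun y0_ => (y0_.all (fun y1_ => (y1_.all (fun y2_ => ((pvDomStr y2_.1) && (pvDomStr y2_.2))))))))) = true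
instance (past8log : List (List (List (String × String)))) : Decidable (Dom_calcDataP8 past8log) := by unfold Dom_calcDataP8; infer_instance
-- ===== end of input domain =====

-- B counts level-major (one scan of all weeks per level name, a nested comprehension),
-- replacing A's week-major five-counter pass plus explicit transpose; simpler, same cost.

-- ===== PORT A =====
-- log['level'] on a log dict; Pre_ guarantees the key is present (Python raises KeyError otherwise)
def pvLevel (log : List (String × String)) : String :=
  ((PySem.Dict.mk log).get? "level").getD ""

-- inner if/elif chain over the 5-tuple of counters
def pvStepA (c : Int × Int × Int × Int × Int) (log : List (String × String)) :
    Int × Int × Int × Int × Int :=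
  let lvl := PySem.Str.lower (pvLevel log)
  if lvl = "debug" then (c.1 + 1, c.2.1, c.2.2.1, c.2.2.2.1, c.2.2.2.2)
  else if lvl = "info" then (c.1, c.2.1 + 1, c.2.2.1, c.2.2.2.1, c.2.2.2.2)
  else if lvl = "warning" then (c.1, c.2.1, c.2.2.1 + 1, c.2.2.2.1, c.2.2.2.2)
  else if lvl = "error" then (c.1, c.2.1, c.2.2.1, c.2.2.2.1 + 1, c.2.2.2.2)
  else if lvl = "critical" then (c.1, c.2.1, c.2.2.1, c.2.2.2.1, c.2.2.2.2 + 1)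
  else c

def calcDataP8 (past8log : List (List (List (String × String)))) : List (List Int) :=
  let weeks : List (List Int) := past8log.foldl (fun weeks week =>
    let c := week.foldl pvStepA (0, 0, 0, 0, 0)
    weeks ++ [[c.1, c.2.1, c.2.2.1, c.2.2.2.1, c.2.2.2.2]]) []
  (PySem.List.pyRange 0 5 1).foldl (fun levels i =>
    levels ++ [weeks.foldl (fun tmp week => tmp ++ [(PySem.List.pyGet? week i).getD 0]) []]) []

-- ===== PORT B =====
-- sum(1 for log in week if log['level'].lower() == name)
def pvCount (name : String) (week : List (List (String × String))) : Int :=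
  week.foldl (fun s log => if PySem.Str.lower (pvLevel log) = name then s + 1 else s) 0

def calcDataP8_alt (past8log : List (List (List (String × String)))) : List (List Int) :=
  (["debug", "info", "warning", "error", "critical"] : List String).map
    (fun name => past8log.map (fun week => pvCount name week))

-- ===== PRECONDITION & SPEC =====
-- Pre_ excludes exactly the inputs where Python A raises KeyError: a log dict without a 'level' key.
def Pre_calcDataP8 (past8log : List (List (List (String × String)))) : Prop :=
  (past8log.all (fun week => week.all (fun log => (PySem.Dict.mk log).contains "level"))) = true
instance (past8log : List (List (List (String × String)))) : Decidable (Pre_calcDataP8 past8log) := by unfold Pre_calcDataP8; infer_instance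
def pvWitness_calcDataP8 : (List (List (List (String × String)))) :=
  [[[("level", "INFO")], [("level", "debug")]], [[("level", "oops")]]]

def Spec_calcDataP8 (past8log : List (List (List (String × String)))) (out : List (List Int)) : Prop := out = calcDataP8_alt past8log
instance (past8log : List (List (List (String × String)))) (out : List (List Int)) : Decidable (Spec_calcDataP8 past8log out) := by unfold Spec_calcDataP8; infer_instance

-- ===== CLAIM (what is proved, stated in full; the proofs are below) =====
def Claim_equal_calcDataP8 : Prop := ∀ (past8log : List (List (List (String × String)))), Dom_calcDataP8 past8log → Pre_calcDataP8 past8log → Spec_calcDataP8 past8log (calcDataP8 past8log)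

-- ===== LEMMAS AND PROOFS =====

-- shifting the start value of B's counting fold
lemma pvCount_shift (name : String) (week : List (List (String × String))) (s : Int) :
    week.foldl (fun t log => if PySem.Str.lower (pvLevel log) = name then t + 1 else t) s
      = s + pvCount name week := by
  induction week generalizing s with
  | nil => simp [pvCount]
  | cons log rest ih =>
    simp only [pvCount, List.foldl_cons]
    rw [ih, ih]
    split_ifs <;> simp [add_assoc]

lemma pvCount_cons (name : String) (log : List (String × String))
    (rest : List (List (String × String))) :
    pvCount name (log :: rest)
      = (if PySem.Str.lower (pvLevel log) = name then (1 : Int) else 0) + pvCount name rest := by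
  simp only [pvCount, List.foldl_cons]
  rw [pvCount_shift]
  split_ifs <;> simp [pvCount]

-- A's five counters for one week are exactly B's five counts
lemma cnt_eq (week : List (List (String × String))) (d i w e c : Int) :
    week.foldl pvStepA (d, i, w, e, c)
      = (d + pvCount "debug" week, i + pvCount "info" week, w + pvCount "warning" week,
         e + pvCount "error" week, c + pvCount "critical" week) := by
  induction week generalizing d i w e c with
  | nil => simp [pvCount]
  | cons log rest ih =>
    simp only [List.foldl_cons, pvCount_cons]
    by_cases h1 : PySem.Str.lower (pvLevel log) = "debug"
    · rw [show pvStepA (d, i, w, e, c) log = (d + 1, i, w, e, c) from by simp [pvStepA, h1], ih]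
      simp [h1, add_assoc]
    by_cases h2 : PySem.Str.lower (pvLevel log) = "info"
    · rw [show pvStepA (d, i, w, e, c) log = (d, i + 1, w, e, c) from by simp [pvStepA, h1, h2], ih]
      simp [h1, h2, add_assoc]
    by_cases h3 : PySem.Str.lower (pvLevel log) = "warning"
    · rw [show pvStepA (d, i, w, e, c) log = (d, i, w + 1, e, c) from by
          simp [pvStepA, h1, h2, h3], ih]
      simp [h1, h2, h3, add_assoc]
    by_cases h4 : PySem.Str.lower (pvLevel log) = "error"
    · rw [show pvStepA (d, i, w, e, c) log = (d, i, w, e + 1, c) from by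
          simp [pvStepA, h1, h2, h3, h4], ih]
      simp [h1, h2, h3, h4, add_assoc]
    by_cases h5 : PySem.Str.lower (pvLevel log) = "critical"
    · rw [show pvStepA (d, i, w, e, c) log = (d, i, w, e, c + 1) from by
          simp [pvStepA, h1, h2, h3, h4, h5], ih]
      simp [h1, h2, h3, h4, h5, add_assoc]
    · rw [show pvStepA (d, i, w, e, c) log = (d, i, w, e, c) from by
          simp [pvStepA, h1, h2, h3, h4, h5], ih]
      simp [h1, h2, h3, h4, h5]

-- ===== VERDICT (by name: the statement is the Claim_ definition above) =====
theorem calcDataP8_spec : Claim_equal_calcDataP8 := by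
  intro xs _ _
  show calcDataP8 xs = calcDataP8_alt xs
  have hweeks : xs.foldl (fun weeks week =>
      let c := week.foldl pvStepA (0, 0, 0, 0, 0)
      weeks ++ [[c.1, c.2.1, c.2.2.1, c.2.2.2.1, c.2.2.2.2]]) ([] : List (List Int))
      = xs.map (fun w => [pvCount "debug" w, pvCount "info" w, pvCount "warning" w,
                          pvCount "error" w, pvCount "critical" w]) := by
    rw [PySem.List.foldl_append_singleton_eq_map, List.nil_append]
    refine List.map_congr_left (fun w _ => ?_)
    show [(w.foldl pvStepA (0,0,0,0,0)).1, (w.foldl pvStepA (0,0,0,0,0)).2.1,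
          (w.foldl pvStepA (0,0,0,0,0)).2.2.1, (w.foldl pvStepA (0,0,0,0,0)).2.2.2.1,
          (w.foldl pvStepA (0,0,0,0,0)).2.2.2.2] = _
    rw [cnt_eq]
    norm_num
  unfold calcDataP8
  rw [hweeks]
  have hrange : PySem.List.pyRange 0 5 1 = [0, 1, 2, 3, 4] := rfl
  rw [hrange]
  simp only [List.foldl_cons, List.foldl_nil, PySem.List.foldl_append_singleton_eq_map,
    List.map_map, List.nil_append]
  unfold calcDataP8_alt
  simp [Function.comp, PySem.List.pyGet?, PySem.List.pyIdx?]
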